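-- pv_equiv track=rewrite | github.com/chiralcentre/Kattis | geneblock.py | solve
-- ===== SOURCE A (Python) =====
-- def solve(n):
--     counter = 0
--     while n > 0:
--         n -= 7
--         counter += 1
--         if not n%10:
--             return str(counter)
--     return str(counter) if n >= 0 else "-1"
-- ===== SOURCE B (Python) =====
-- def solve(n):
--     if n <= 0:
--         return "0" if n == 0 else "-1"
--     r = (3 * n) % 10
--     k = r if r else 10
--     return str(k) if n > 7 * (k - 1) else "-1"
-- ===== Notes on version B (the rewrite author's own statement) =====
-- stated objective: simpler
-- what changed: Replaces the subtract-7 loop with a closed form: the count of subtractions is 3*n mod 10 (inverse of 7 mod 10), with 10 when that is 0, guarded by the reachability test n > 7*(k-1).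
import Mathlib
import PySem

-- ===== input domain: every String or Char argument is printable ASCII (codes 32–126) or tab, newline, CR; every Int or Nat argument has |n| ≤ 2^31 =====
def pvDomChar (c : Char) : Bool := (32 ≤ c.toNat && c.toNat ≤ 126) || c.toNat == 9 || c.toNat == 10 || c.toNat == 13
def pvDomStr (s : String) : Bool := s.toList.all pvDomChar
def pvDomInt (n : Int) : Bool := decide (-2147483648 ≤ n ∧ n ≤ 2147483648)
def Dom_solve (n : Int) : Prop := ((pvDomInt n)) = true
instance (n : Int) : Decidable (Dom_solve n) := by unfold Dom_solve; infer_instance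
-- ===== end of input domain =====

-- B replaces A's subtract-7 loop with a closed form via the modular inverse of 7 mod 10 (objective: simpler).

-- ===== PORT A =====
-- the while loop of A, state (n, counter)
def solveLoop (n counter : Int) : String :=
  if h : n > 0 then
    let n' := n - 7
    let counter' := counter + 1
    if PySem.Int.mod n' 10 = 0 then PySem.Int.toStr counter'
    else solveLoop n' counter'
  else
    if n ≥ 0 then PySem.Int.toStr counter else "-1"
termination_by n.toNat
decreasing_by omega

def solve (n : Int) : String := solveLoop n 0

-- ===== PORT B =====
def solve_alt (n : Int) : String :=
  if n ≤ 0 then (if n = 0 then "0" else "-1")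
  else
    let r := PySem.Int.mod (3 * n) 10
    let k := if r = 0 then (10 : Int) else r
    if n > 7 * (k - 1) then PySem.Int.toStr k else "-1"

-- ===== PRECONDITION & SPEC =====
def Spec_solve (n : Int) (out : String) : Prop := out = solve_alt n
instance (n : Int) (out : String) : Decidable (Spec_solve n out) := by unfold Spec_solve; infer_instance

-- ===== CLAIM (what is proved, stated in full; the proofs are below) =====
def Claim_equal_solve : Prop := ∀ (n : Int), Dom_solve n → Spec_solve n (solve n)

-- ===== LEMMAS AND PROOFS =====

-- the number of subtractions B computes
def kf (n : Int) : Int :=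
  if PySem.Int.mod (3 * n) 10 = 0 then 10 else PySem.Int.mod (3 * n) 10

theorem pymod10 (a : Int) : PySem.Int.mod a 10 = a % 10 :=
  PySem.Int.mod_eq_emod_of_pos (by norm_num)

theorem kf_range (n : Int) : 1 ≤ kf n ∧ kf n ≤ 10 := by
  unfold kf
  rw [pymod10]
  split <;> omega

theorem kf_one_iff (n : Int) : kf n = 1 ↔ PySem.Int.mod (n - 7) 10 = 0 := by
  unfold kf
  rw [pymod10, pymod10]
  split <;> omega

theorem kf_pred (n : Int) (h : kf n ≠ 1) : kf (n - 7) = kf n - 1 := by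
  unfold kf at *
  rw [pymod10, pymod10] at *
  have h3 : (3 * (n - 7)) = 3 * n - 21 := by ring
  rw [h3]
  split at h <;> split <;> omega

-- closed form of the loop, by strong induction on n
theorem solveLoop_eq (m : Nat) : ∀ n c : Int, 0 < n → n.toNat ≤ m →
    solveLoop n c = (if n > 7 * (kf n - 1) then PySem.Int.toStr (c + kf n) else "-1") := by
  induction m with
  | zero => intro n c hn hm; omega
  | succ m ih =>
    intro n c hn hm
    rw [solveLoop]
    simp only [hn, dite_true]
    by_cases hmod : PySem.Int.mod (n - 7) 10 = 0
    · have hk1 : kf n = 1 := (kf_one_iff n).mpr hmod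
      rw [if_pos hmod, hk1]
      have h7 : n > 7 * (1 - 1) := by omega
      rw [if_pos h7]
    · have hk1 : kf n ≠ 1 := fun h => hmod ((kf_one_iff n).mp h)
      have hkr := kf_range n
      simp only [hmod, if_false]
      by_cases hpos : 0 < n - 7
      · rw [ih (n - 7) (c + 1) hpos (by omega)]
        rw [kf_pred n hk1]
        have hcond : (n - 7 > 7 * (kf n - 1 - 1)) ↔ (n > 7 * (kf n - 1)) := by omega
        simp only [hcond]
        have : c + 1 + (kf n - 1) = c + kf n := by ring
        rw [this]
      · -- n - 7 ≤ 0 and not a multiple of 10, so n - 7 ∈ [-6,-1]: loop returns "-1"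
        rw [solveLoop]
        have hn7 : ¬ (n - 7 > 0) := by omega
        have hneg : ¬ (n - 7 ≥ 0) := by
          intro hge
          have : n - 7 = 0 := by omega
          rw [this] at hmod
          exact hmod rfl
        simp only [hn7, dite_false, hneg, if_false]
        have : ¬ (n > 7 * (kf n - 1)) := by omega
        simp [this]

-- ===== VERDICT (by name: the statement is the Claim_ definition above) =====
theorem solve_spec : Claim_equal_solve := by
  intro n _
  unfold Spec_solve solve solve_alt
  by_cases hn : 0 < n
  · rw [solveLoop_eq n.toNat n 0 hn (le_refl _)]
    have : ¬ n ≤ 0 := by omega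
    simp only [this, if_false, zero_add]
    rfl
  · rw [solveLoop]
    have h0 : ¬ (n > 0) := hn
    have hle : n ≤ 0 := by omega
    simp only [h0, dite_false, hle, if_true]
    by_cases he : n = 0
    · subst he; norm_num; rfl
    · have : ¬ (n ≥ 0) := by omega
      simp [this, he]
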